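-- pv_equiv track=rewrite | github.com/SimonTsankov/CodeWars | out/production/CodeWars/com/company/Cafee killer.py | coffee_limits
-- ===== SOURCE A (Python) =====
-- def coffee_limits(year, month, day):
--     c_c=0;  c_d = 0;    max_c=0;     max_d=0;
--     if(month<10):
--         month="0"+str(month)
--     if(day<10):
--         day="0"+str(day)
--     h= int("".join(map(str, [year,month,day])));     h_d=h
--     for i in range(0,5000):
--         if("dead" in str(hex(h))):
--             max_c=c_c
--         else:
--             h=h+51966
--             c_c+=1
--         if("dead"in hex(h_d) and i!=0):
--             max_d=c_d
--         else:
--             c_d+=1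
--             h_d=h_d+912559
--     return [max_c,max_d]
-- ===== SOURCE B (Python) =====
-- def _has_dead(n):
--     # arithmetic 'dead'-in-hex test: scan 16-bit windows of |n| nibble by nibble
--     n = abs(n)
--     while n:
--         if n & 0xFFFF == 0xDEAD:
--             return True
--         n >>= 4
--     return False
--
--
-- def coffee_limits(year, month, day):
--     m = "0" + str(month) if month < 10 else str(month)
--     d = "0" + str(day) if day < 10 else str(day)
--     h0 = int(str(year) + m + d)
--     max_c = 0
--     for k in range(5000):
--         if _has_dead(h0 + 51966 * k):
--             max_c = k
--             break
--     max_d = 0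
--     for i in range(1, 5000):
--         if _has_dead(h0 + 912559 * i):
--             max_d = i
--             break
--     return [max_c, max_d]
-- ===== Notes on version B (the rewrite author's own statement) =====
-- stated objective: alternative
-- what changed: replaces A's hex-string formatting plus substring matching with a pure integer bit scan ((|n|>>4k) & 0xFFFF == 0xDEAD) for the 'dead' test, and the fused 5000-iteration loop over six pieces of mutable state with two independent early-exit searches
import Mathlib
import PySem

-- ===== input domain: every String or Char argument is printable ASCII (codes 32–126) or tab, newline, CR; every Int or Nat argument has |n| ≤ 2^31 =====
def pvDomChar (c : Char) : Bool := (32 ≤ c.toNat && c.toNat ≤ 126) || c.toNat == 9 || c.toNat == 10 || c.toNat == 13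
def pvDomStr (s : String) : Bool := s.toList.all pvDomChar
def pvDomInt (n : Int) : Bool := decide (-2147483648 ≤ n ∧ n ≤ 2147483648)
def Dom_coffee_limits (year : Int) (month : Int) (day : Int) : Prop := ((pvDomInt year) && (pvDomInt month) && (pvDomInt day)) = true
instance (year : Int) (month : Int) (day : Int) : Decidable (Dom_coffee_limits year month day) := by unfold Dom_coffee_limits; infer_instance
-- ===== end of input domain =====

-- B replaces A's hex-string formatting + substring matching by pure integer bit
-- arithmetic (scan the 16-bit windows of |n| for 0xDEAD), and the fused 5000-iteration
-- loop over six pieces of mutable state by two independent early-exit searches (alternative; same cost).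

-- ===== PORT A =====
-- hand port of CPython hex(n) digit part: lowercase hex digits of |n|, most significant first (exact)
def hexChars (m : Nat) : List Char :=
  if _h : m = 0 then [] else hexChars (m / 16) ++ [Nat.digitChar (m % 16)]
termination_by m
decreasing_by exact Nat.div_lt_self (by omega) (by omega)

-- hex(n) as a char list: '0x'/'-0x' prefix + digits ('0x0' for zero); str(hex(h)) = hex(h) (exact)
def pyHexChars (n : Int) : List Char :=
  (if n < 0 then ['-', '0', 'x'] else ['0', 'x']) ++
    (if n.natAbs = 0 then ['0'] else hexChars n.natAbs)

-- "dead" in hex(h)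
def deadHex (h : Int) : Bool := PySem.Chars.isIn ['d', 'e', 'a', 'd'] (pyHexChars h)

-- the body of A's for-loop, state = ((h, c_c, max_c), (h_d, c_d, max_d))
def stepA (st : (Int × Int × Int) × (Int × Int × Int)) (i : Int) :
    (Int × Int × Int) × (Int × Int × Int) :=
  ((if deadHex st.1.1 then (st.1.1, st.1.2.1, st.1.2.1)
    else (st.1.1 + 51966, st.1.2.1 + 1, st.1.2.2)),
   (if deadHex st.2.1 && decide (i ≠ 0) then (st.2.1, st.2.2.1, st.2.2.1)
    else (st.2.1 + 912559, st.2.2.1 + 1, st.2.2.2)))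

def coffee_limits (year : Int) (month : Int) (day : Int) : List Int :=
  let month2 : String := if month < 10 then "0" ++ PySem.Int.toStr month else PySem.Int.toStr month
  let day2 : String := if day < 10 then "0" ++ PySem.Int.toStr day else PySem.Int.toStr day
  -- "".join(map(str,[year,month,day])) of three strings = their concatenation (exact);
  -- int() raises outside Pre_, there the .getD value is unclaimed
  let h0 : Int := (PySem.Int.ofStr? (PySem.Int.toStr year ++ month2 ++ day2)).getD 0
  let fin := (PySem.List.pyRange 0 5000 1).foldl stepA ((h0, 0, 0), (h0, 0, 0))
  [fin.1.2.2, fin.2.2.2]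

-- ===== PORT B =====
-- _has_dead: while n: if n & 0xFFFF == 0xDEAD: return True; n >>= 4  (on |n|)
def hasDead (m : Nat) : Bool :=
  if _h : m = 0 then false
  else if m &&& 65535 == 57005 then true
  else hasDead (m >>> 4)
termination_by m
decreasing_by
  rw [Nat.shiftRight_eq_div_pow]
  exact Nat.div_lt_self (by omega) (by norm_num)

-- early-exit for-loop: first k (fuel steps from k) with _has_dead(h0 + step*k), else 0
def findHit (h0 step : Int) : Nat → Int → Int
  | 0, _ => 0
  | n + 1, k => if hasDead (h0 + step * k).natAbs then k else findHit h0 step n (k + 1)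

def coffee_limits_alt (year : Int) (month : Int) (day : Int) : List Int :=
  let month2 : String := if month < 10 then "0" ++ PySem.Int.toStr month else PySem.Int.toStr month
  let day2 : String := if day < 10 then "0" ++ PySem.Int.toStr day else PySem.Int.toStr day
  let h0 : Int := (PySem.Int.ofStr? (PySem.Int.toStr year ++ month2 ++ day2)).getD 0
  [findHit h0 51966 5000 0, findHit h0 912559 4999 1]

-- ===== PRECONDITION & SPEC =====
-- A raises ValueError iff month < 0 or day < 0 (the '-' of the padded piece lands mid-string,
-- so int() fails); Pre_ excludes exactly those inputs (B raises there too).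
def Pre_coffee_limits (year : Int) (month : Int) (day : Int) : Prop := 0 ≤ month ∧ 0 ≤ day
instance (year : Int) (month : Int) (day : Int) : Decidable (Pre_coffee_limits year month day) := by unfold Pre_coffee_limits; infer_instance
def pvWitness_coffee_limits : Int × Int × Int := (2019, 1, 1)

def Spec_coffee_limits (year : Int) (month : Int) (day : Int) (out : List Int) : Prop := out = coffee_limits_alt year month day
instance (year : Int) (month : Int) (day : Int) (out : List Int) : Decidable (Spec_coffee_limits year month day out) := by unfold Spec_coffee_limits; infer_instance

-- ===== CLAIM (what is proved, stated in full; the proofs are below) =====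
def Claim_equal_coffee_limits : Prop := ∀ (year : Int) (month : Int) (day : Int), Dom_coffee_limits year month day → Pre_coffee_limits year month day → Spec_coffee_limits year month day (coffee_limits year month day)

-- ===== LEMMAS AND PROOFS =====

-- generic snoc-shape facts about suffix/infix (right-end duals of cons_prefix_cons/infix_cons_iff)
theorem suffix_snoc_iff {α : Type} (l t : List α) (a b : α) :
    l ++ [a] <:+ t ++ [b] ↔ a = b ∧ l <:+ t := by
  rw [← List.reverse_prefix]
  simp [List.cons_prefix_cons]

theorem infix_snoc_iff {α : Type} (l t : List α) (b : α) :
    l <:+: t ++ [b] ↔ l <:+ t ++ [b] ∨ l <:+: t := by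
  calc l <:+: t ++ [b] ↔ l.reverse <:+: (t ++ [b]).reverse := (List.reverse_infix).symm
    _ ↔ l.reverse <:+: b :: t.reverse := by simp
    _ ↔ l.reverse <+: b :: t.reverse ∨ l.reverse <:+: t.reverse := List.infix_cons_iff
    _ ↔ l <:+ t ++ [b] ∨ l <:+: t := by
        rw [show b :: t.reverse = (t ++ [b]).reverse by simp, List.reverse_prefix, List.reverse_infix]

theorem digitChar_eq_d {k : Nat} (hk : k < 16) : 'd' = Nat.digitChar k ↔ k = 13 := by
  interval_cases k <;> decide

theorem digitChar_eq_e {k : Nat} (hk : k < 16) : 'e' = Nat.digitChar k ↔ k = 14 := by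
  interval_cases k <;> decide

theorem digitChar_eq_a {k : Nat} (hk : k < 16) : 'a' = Nat.digitChar k ↔ k = 10 := by
  interval_cases k <;> decide

theorem hexChars_pos (m : Nat) (hm : m ≠ 0) :
    hexChars m = hexChars (m / 16) ++ [Nat.digitChar (m % 16)] := by
  rw [hexChars]; simp [hm]

-- the left prefixes of "dead" as suffixes of the digit string = value of the low nibbles
theorem sfx_d (m : Nat) : ['d'] <:+ hexChars m ↔ m % 16 = 13 := by
  by_cases hm : m = 0
  · subst hm; rw [hexChars]; simp
  · rw [hexChars_pos m hm, show (['d'] : List Char) = [] ++ ['d'] from rfl, suffix_snoc_iff]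
    simp [digitChar_eq_d (Nat.mod_lt m (by omega))]

theorem sfx_de (m : Nat) : ['d', 'e'] <:+ hexChars m ↔ m % 256 = 222 := by
  by_cases hm : m = 0
  · subst hm; rw [hexChars]; simp
  · rw [hexChars_pos m hm, show (['d', 'e'] : List Char) = ['d'] ++ ['e'] from rfl,
      suffix_snoc_iff, digitChar_eq_e (Nat.mod_lt m (by omega)), sfx_d]
    omega

theorem sfx_dea (m : Nat) : ['d', 'e', 'a'] <:+ hexChars m ↔ m % 4096 = 3562 := by
  by_cases hm : m = 0
  · subst hm; rw [hexChars]; simp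
  · rw [hexChars_pos m hm, show (['d', 'e', 'a'] : List Char) = ['d', 'e'] ++ ['a'] from rfl,
      suffix_snoc_iff, digitChar_eq_a (Nat.mod_lt m (by omega)), sfx_de]
    omega

theorem sfx_dead (m : Nat) : ['d', 'e', 'a', 'd'] <:+ hexChars m ↔ m % 65536 = 57005 := by
  by_cases hm : m = 0
  · subst hm; rw [hexChars]; simp
  · rw [hexChars_pos m hm, show (['d', 'e', 'a', 'd'] : List Char) = ['d', 'e', 'a'] ++ ['d'] from rfl,
      suffix_snoc_iff, digitChar_eq_d (Nat.mod_lt m (by omega)), sfx_dea]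
    omega

theorem hasDead_pos (m : Nat) (hm : m ≠ 0) :
    hasDead m = (decide (m % 65536 = 57005) || hasDead (m / 16)) := by
  rw [hasDead]
  have h1 : m &&& 65535 = m % 65536 := by
    have := Nat.and_two_pow_sub_one_eq_mod m 16
    norm_num at this; omega
  have h2 : m >>> 4 = m / 16 := by rw [Nat.shiftRight_eq_div_pow]
  simp [hm, h1, h2]

-- 'dead' occurs in the hex digits of m iff the bit scan finds a 0xDEAD window
theorem infix_dead_hexChars (m : Nat) :
    ['d', 'e', 'a', 'd'] <:+: hexChars m ↔ hasDead m = true := by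
  induction m using Nat.strong_induction_on with
  | _ m ih =>
    by_cases hm : m = 0
    · subst hm; rw [hexChars, hasDead]; simp
    · rw [hexChars_pos m hm, infix_snoc_iff, ← hexChars_pos m hm, sfx_dead,
        hasDead_pos m hm, ih (m / 16) (Nat.div_lt_self (by omega) (by omega))]
      simp [Bool.or_eq_true]

-- 'dead' never overlaps the '-0x'/'0x' prefix (none of its chars is 'd')
theorem strip_cons (c : Char) (hc : ('d' : Char) ≠ c) (l : List Char) :
    (['d', 'e', 'a', 'd'] <:+: c :: l) ↔ ['d', 'e', 'a', 'd'] <:+: l := by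
  rw [List.infix_cons_iff]
  simp [List.cons_prefix_cons, hc]

-- bridge: A's string test equals B's arithmetic test
theorem deadHex_eq (h : Int) : deadHex h = hasDead h.natAbs := by
  by_cases hz : h.natAbs = 0
  · have h0 : h = 0 := by omega
    subst h0
    rw [show hasDead (Int.natAbs 0) = false from by rw [hasDead]; simp]
    decide
  · have hpre : pyHexChars h =
        (if h < 0 then ['-', '0', 'x'] else ['0', 'x']) ++ hexChars h.natAbs := by
      unfold pyHexChars; simp [hz]
    rw [Bool.eq_iff_iff]
    unfold deadHex
    rw [hpre, PySem.Chars.isIn_iff_infix]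
    by_cases hneg : h < 0
    · simp only [hneg, if_true, List.cons_append, List.nil_append]
      rw [strip_cons _ (by decide) _, strip_cons _ (by decide) _, strip_cons _ (by decide) _,
        infix_dead_hexChars]
    · simp only [hneg, if_false, List.cons_append, List.nil_append]
      rw [strip_cons _ (by decide) _, strip_cons _ (by decide) _, infix_dead_hexChars]

-- one independent search step with stride s (A's c- or d-side, decoupled)
def cstep (s : Int) (st : Int × Int × Int) : Int × Int × Int :=
  if deadHex st.1 then (st.1, st.2.1, st.2.1) else (st.1 + s, st.2.1 + 1, st.2.2)

def giter (s : Int) : Nat → (Int × Int × Int) → Int × Int × Int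
  | 0, st => st
  | n + 1, st => giter s n (cstep s st)

theorem giter_dead (s : Int) (n : Nat) (h k : Int) (hd : deadHex h = true) :
    giter s n (h, k, k) = (h, k, k) := by
  induction n with
  | zero => rfl
  | succ n ih => simp [giter, cstep, hd, ih]

theorem giter_search (s : Int) (n : Nat) : ∀ (h0 k : Int),
    (giter s n (h0 + s * k, k, 0)).2.2 = findHit h0 s n k := by
  induction n with
  | zero => intro h0 k; rfl
  | succ n ih =>
    intro h0 k
    by_cases hd : deadHex (h0 + s * k) = true
    · simp [giter, cstep, hd, giter_dead, findHit, ← deadHex_eq]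
    · have hstep : h0 + s * k + s = h0 + s * (k + 1) := by ring
      simp [giter, cstep, hd, findHit, ← deadHex_eq, hstep, ih h0 (k + 1)]

-- on a list with no zero, the fused step is the product of the two independent steps
theorem foldl_stepA_split (l : List Int) (hl : ∀ i ∈ l, i ≠ 0) :
    ∀ (p q : Int × Int × Int),
    l.foldl stepA (p, q) = (giter 51966 l.length p, giter 912559 l.length q) := by
  induction l with
  | nil => intro p q; rfl
  | cons i t ih =>
    intro p q
    have hi : i ≠ 0 := hl i (List.mem_cons_self ..)
    have ht : ∀ j ∈ t, j ≠ 0 := fun j hj => hl j (List.mem_cons_of_mem _ hj)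
    have hstep : stepA (p, q) i = (cstep 51966 p, cstep 912559 q) := by
      simp [stepA, cstep, hi]
    simp [List.foldl_cons, hstep, ih ht, giter]

theorem loop_eval (h0 : Int) :
    ((PySem.List.pyRange 0 5000 1).foldl stepA ((h0, 0, 0), (h0, 0, 0))) =
      (giter 51966 4999 (cstep 51966 (h0, 0, 0)), giter 912559 4999 (h0 + 912559, 1, 0)) := by
  rw [PySem.List.pyRange_one_cons (by decide : (0:Int) < 5000), List.foldl_cons]
  have h1 : stepA ((h0, 0, 0), (h0, 0, 0)) 0 = ((cstep 51966 (h0, 0, 0)), (h0 + 912559, 1, 0)) := by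
    simp [stepA, cstep]
  have hmem : ∀ i ∈ PySem.List.pyRange 1 5000 1, i ≠ 0 := by
    intro i hi
    rw [PySem.List.mem_pyRange_one] at hi
    omega
  have hlen : (PySem.List.pyRange 1 5000 1).length = 4999 := by
    rw [PySem.List.length_pyRange_one]
    decide
  rw [h1, show (0:Int)+1 = 1 from by norm_num, foldl_stepA_split _ hmem, hlen]

theorem c_side (h0 : Int) :
    (giter 51966 4999 (cstep 51966 (h0, 0, 0))).2.2 = findHit h0 51966 5000 0 := by
  have h5 : findHit h0 51966 5000 0 =
      if deadHex h0 then 0 else findHit h0 51966 4999 1 := by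
    rw [show (5000:Nat) = 4999 + 1 from rfl, findHit, ← deadHex_eq]
    norm_num
  by_cases hd : deadHex h0 = true
  · have e : cstep 51966 (h0, 0, 0) = (h0, 0, 0) := by simp [cstep, hd]
    rw [e, giter_dead _ _ _ _ hd, h5, if_pos hd]
  · have e : cstep 51966 (h0, 0, 0) = (h0 + 51966 * 1, 1, 0) := by
      simp [cstep, hd]
    rw [e, giter_search, h5, if_neg (by simpa using hd)]

theorem d_side (h0 : Int) :
    (giter 912559 4999 (h0 + 912559, 1, 0)).2.2 = findHit h0 912559 4999 1 := by
  have : h0 + 912559 = h0 + 912559 * 1 := by ring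
  rw [this, giter_search]

-- ===== VERDICT (by name: the statement is the Claim_ definition above) =====
theorem coffee_limits_spec : Claim_equal_coffee_limits := by
  intro year month day _ _
  unfold Spec_coffee_limits coffee_limits coffee_limits_alt
  simp only [loop_eval, c_side, d_side]
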